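-- pv_equiv track=rewrite | github.com/rbark/AoC2016 | day7.py | valid_ip_aba
-- ===== SOURCE A (Python) =====
-- def check_if_aba(word):
--     i = 0
--     words = []
--     valid = False
--     while i < len(word) - 2:
--         if word[i] == word[i + 2] and word[i] != word[i + 1]:
--             valid = True
--             words.append( word[i] + word[i + 1] + word[i + 2])
--         i += 1
--     return valid, words
--
-- def valid_ip_aba(nets, hypernets):
--     for word in nets:
--         (valid, words) = check_if_aba(word)
--         if valid:
--             for word in words:
--                 word_to_find = word[1] + word[0] + word[1]
--                 for hypernet in hypernets:
--                     if word_to_find in hypernet: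
--                         return True
--     return False
-- ===== SOURCE B (Python) =====
-- def valid_ip_aba(nets, hypernets):
--     babs = set()
--     for net in nets:
--         for a, b, c in zip(net, net[1:], net[2:]):
--             if a == c and a != b:
--                 babs.add(b + a + b)
--     trips = set()
--     for h in hypernets:
--         for a, b, c in zip(h, h[1:], h[2:]):
--             if a == c and a != b:
--                 trips.add(a + b + c)
--     return bool(babs & trips)
-- ===== Notes on version B (the rewrite author's own statement) =====
-- stated objective: alternative
-- what changed: Replaces A's per-net ABA extraction with nested early-return substring scans of every hypernet by two independent collection passes (a set of BAB strings from the nets, a set of ABA window triples from the hypernets) followed by one set intersection.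
import Mathlib
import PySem

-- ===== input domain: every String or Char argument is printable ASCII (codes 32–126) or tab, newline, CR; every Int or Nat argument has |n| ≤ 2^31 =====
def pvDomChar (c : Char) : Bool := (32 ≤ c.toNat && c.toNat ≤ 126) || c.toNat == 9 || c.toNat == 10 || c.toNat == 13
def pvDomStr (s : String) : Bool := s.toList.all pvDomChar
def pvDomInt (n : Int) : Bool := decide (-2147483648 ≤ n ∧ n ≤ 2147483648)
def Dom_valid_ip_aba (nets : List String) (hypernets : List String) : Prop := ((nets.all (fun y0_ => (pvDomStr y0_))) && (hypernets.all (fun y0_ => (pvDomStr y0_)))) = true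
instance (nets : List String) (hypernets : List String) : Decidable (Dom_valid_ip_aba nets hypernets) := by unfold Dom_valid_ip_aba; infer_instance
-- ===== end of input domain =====

-- B replaces A's per-ABA early-return substring scans of the hypernets by two independent
-- collection passes (net BABs, hypernet ABA window triples) and one set intersection (objective: alternative).

-- ===== PORT A =====
-- 'while i < len(word)-2' reading word[i], word[i+1], word[i+2]: the guard proves the
-- indices in range, so getD is exact on every reached index.
def checkAbaGo (cs : List Char) (i : Nat) (acc : List String) (valid : Bool) : Bool × List String :=
  if _h : i + 2 < cs.length then
    let a := cs.getD i ' '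
    let b := cs.getD (i+1) ' '
    let c := cs.getD (i+2) ' '
    if a == c && a != b then
      checkAbaGo cs (i+1) (acc ++ [String.ofList [a, b, c]]) true
    else
      checkAbaGo cs (i+1) acc valid
  else (valid, acc)
termination_by cs.length - i

def check_if_aba (word : String) : Bool × List String :=
  checkAbaGo word.toList 0 [] false

def valid_ip_aba (nets : List String) (hypernets : List String) : Bool :=
  match nets with
  | [] => false
  | word :: rest =>
    -- 'if valid: for word in words: … return True' — the early return is an 'any';
    -- words are length-3 strings, so getD at 0/1 is exact
    if (check_if_aba word).1 && (check_if_aba word).2.any (fun w =>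
        hypernets.any (fun h =>
          PySem.Str.isIn (String.ofList [w.toList.getD 1 ' ', w.toList.getD 0 ' ', w.toList.getD 1 ' ']) h))
    then true
    else valid_ip_aba rest hypernets

-- ===== PORT B =====
-- zip(s, s[1:], s[2:]) = the width-3 sliding window (zip truncates to the shortest)
def win3 (cs : List Char) : List (Char × Char × Char) :=
  match cs with
  | a :: b :: c :: rest => (a, b, c) :: win3 (b :: c :: rest)
  | _ => []

def valid_ip_aba_alt (nets : List String) (hypernets : List String) : Bool :=
  let babs := nets.foldl (fun s net =>
      (win3 net.toList).foldl (fun s t =>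
        if t.1 == t.2.2 && t.1 != t.2.1 then PySem.Set.add s (String.ofList [t.2.1, t.1, t.2.1]) else s) s)
    PySem.Set.empty
  let trips := hypernets.foldl (fun s h =>
      (win3 h.toList).foldl (fun s t =>
        if t.1 == t.2.2 && t.1 != t.2.1 then PySem.Set.add s (String.ofList [t.1, t.2.1, t.2.2]) else s) s)
    PySem.Set.empty
  !(PySem.Set.inter babs trips).isEmpty

-- ===== PRECONDITION & SPEC =====
def Spec_valid_ip_aba (nets : List String) (hypernets : List String) (out : Bool) : Prop := out = valid_ip_aba_alt nets hypernets
instance (nets : List String) (hypernets : List String) (out : Bool) : Decidable (Spec_valid_ip_aba nets hypernets out) := by unfold Spec_valid_ip_aba; infer_instance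

-- ===== CLAIM (what is proved, stated in full; the proofs are below) =====
def Claim_equal_valid_ip_aba : Prop := ∀ (nets : List String) (hypernets : List String), Dom_valid_ip_aba nets hypernets → Spec_valid_ip_aba nets hypernets (valid_ip_aba nets hypernets)

-- ===== LEMMAS AND PROOFS =====

-- clean characterisation of A's while-loop: the ABA triples, sliding over the list structure
def triples (cs : List Char) : List String :=
  match cs with
  | a :: b :: c :: rest =>
      (if a == c && a != b then [String.ofList [a, b, c]] else []) ++ triples (b :: c :: rest)
  | _ => []

theorem triples_drop_eq (cs : List Char) (i : Nat) (h : i + 2 < cs.length) :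
    triples (cs.drop i) =
      (if cs[i]'(by omega) == cs[i+2]'(by omega) && cs[i]'(by omega) != cs[i+1]'(by omega)
        then [String.ofList [cs[i]'(by omega), cs[i+1]'(by omega), cs[i+2]'(by omega)]] else [])
      ++ triples (cs.drop (i+1)) := by
  rw [List.drop_eq_getElem_cons (l := cs) (by omega : i < cs.length),
      List.drop_eq_getElem_cons (l := cs) (by omega : i + 1 < cs.length),
      List.drop_eq_getElem_cons (l := cs) (by omega : i + 2 < cs.length)]
  rw [triples]

theorem checkAbaGo_eq (cs : List Char) (i : Nat) (acc : List String) (valid : Bool) :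
    checkAbaGo cs i acc valid =
      ((valid || !(triples (cs.drop i)).isEmpty), acc ++ triples (cs.drop i)) := by
  rw [checkAbaGo]
  split
  · next h =>
    have hd := triples_drop_eq cs i h
    have g0 : cs.getD i ' ' = cs[i]'(by omega) := List.getD_eq_getElem _ _ (by omega)
    have g1 : cs.getD (i+1) ' ' = cs[i+1]'(by omega) := List.getD_eq_getElem _ _ (by omega)
    have g2 : cs.getD (i+2) ' ' = cs[i+2]'(by omega) := List.getD_eq_getElem _ _ (by omega)
    simp only [g0, g1, g2]
    split
    · next hc =>
      rw [checkAbaGo_eq cs (i+1), hd]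
      simp [hc]
    · next hc =>
      rw [checkAbaGo_eq cs (i+1), hd]
      simp [hc]
  · next h =>
    have hlen : (cs.drop i).length ≤ 2 := by simp; omega
    rcases hd : cs.drop i with _ | ⟨x, _ | ⟨y, _ | ⟨z, r⟩⟩⟩
    · simp [triples]
    · simp [show triples [x] = [] from rfl]
    · simp [show triples [x, y] = [] from rfl]
    · exfalso; rw [hd] at hlen; simp at hlen
termination_by cs.length - i

theorem check_if_aba_eq (word : String) :
    check_if_aba word = (!(triples word.toList).isEmpty, triples word.toList) := by
  rw [check_if_aba, checkAbaGo_eq]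
  simp

theorem mem_win3_iff_infix (cs : List Char) (a b c : Char) :
    (a, b, c) ∈ win3 cs ↔ [a, b, c] <:+: cs := by
  induction cs using win3.induct with
  | case1 x y z rest ih =>
    rw [win3]
    simp only [List.mem_cons, ih, List.infix_cons_iff, Prod.mk.injEq,
      List.cons_prefix_cons, List.nil_prefix, and_true]
  | case2 cs h =>
    rcases cs with _ | ⟨x, _ | ⟨y, _ | ⟨z, r⟩⟩⟩
    · simp [win3]
    · simp only [show win3 [x] = [] from rfl, List.not_mem_nil, false_iff]
      intro hinf; have := hinf.length_le; simp at this
    · simp only [show win3 [x, y] = [] from rfl, List.not_mem_nil, false_iff]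
      intro hinf; have := hinf.length_le; simp at this
    · exact (h x y z r rfl).elim

theorem mem_triples (cs : List Char) (w : String) :
    w ∈ triples cs ↔ ∃ a b, (a, b, a) ∈ win3 cs ∧ a ≠ b ∧ w = String.ofList [a, b, a] := by
  induction cs using triples.induct with
  | case1 x y z rest ih =>
    rw [triples, win3]
    by_cases hc : (x == z && x != y) = true
    · obtain ⟨h1, h2⟩ : x = z ∧ x ≠ y := by simpa using hc
      obtain rfl : z = x := h1.symm
      rw [if_pos hc]
      simp only [List.mem_append, ih, List.mem_cons, Prod.mk.injEq]
      constructor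
      · rintro ((rfl | h0) | ⟨a, b, hmem, hab, rfl⟩)
        · exact ⟨z, y, Or.inl ⟨rfl, rfl, rfl⟩, h2, rfl⟩
        · simp at h0
        · exact ⟨a, b, Or.inr hmem, hab, rfl⟩
      · rintro ⟨a, b, ⟨rfl, rfl, -⟩ | hmem, hab, rfl⟩
        · exact Or.inl (Or.inl rfl)
        · exact Or.inr ⟨a, b, hmem, hab, rfl⟩
    · rw [if_neg hc]
      simp only [List.nil_append, ih, List.mem_cons, Prod.mk.injEq]
      constructor
      · rintro ⟨a, b, hmem, hab, rfl⟩
        exact ⟨a, b, Or.inr hmem, hab, rfl⟩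
      · rintro ⟨a, b, ⟨rfl, rfl, rfl⟩ | hmem, hab, rfl⟩
        · exact absurd (by simp [hab]) hc
        · exact ⟨a, b, hmem, hab, rfl⟩
  | case2 cs h =>
    rcases cs with _ | ⟨x, _ | ⟨y, _ | ⟨z, r⟩⟩⟩
    · simp [triples, win3]
    · simp [show triples [x] = [] from rfl, show win3 [x] = [] from rfl]
    · simp [show triples [x, y] = [] from rfl, show win3 [x, y] = [] from rfl]
    · exact (h x y z r rfl).elim

theorem anyf_iff (w : String) (hypernets : List String) :
    ((triples w.toList).any (fun v =>
        hypernets.any (fun h =>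
          PySem.Str.isIn (String.ofList [v.toList.getD 1 ' ', v.toList.getD 0 ' ', v.toList.getD 1 ' ']) h))) = true ↔
      ∃ a b, (a, b, a) ∈ win3 w.toList ∧ a ≠ b ∧
        ∃ h ∈ hypernets, PySem.Str.isIn (String.ofList [b, a, b]) h = true := by
  rw [List.any_eq_true]
  constructor
  · rintro ⟨v, hv, hf⟩
    obtain ⟨a, b, hwin, hab, rfl⟩ := (mem_triples _ _).1 hv
    refine ⟨a, b, hwin, hab, ?_⟩
    simpa [List.any_eq_true] using hf
  · rintro ⟨a, b, hwin, hab, h, hh, hin⟩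
    refine ⟨String.ofList [a, b, a], (mem_triples _ _).2 ⟨a, b, hwin, hab, rfl⟩, ?_⟩
    rw [List.any_eq_true]
    exact ⟨h, hh, by simpa using hin⟩

theorem A_true_iff (nets hypernets : List String) :
    valid_ip_aba nets hypernets = true ↔
      ∃ net ∈ nets, ∃ a b, (a, b, a) ∈ win3 net.toList ∧ a ≠ b ∧
        ∃ h ∈ hypernets, PySem.Str.isIn (String.ofList [b, a, b]) h = true := by
  induction nets with
  | nil => simp [valid_ip_aba]
  | cons w rest ih =>
    rw [valid_ip_aba, check_if_aba_eq]
    have hguard : ∀ (t : List String) (f : String → Bool), (!t.isEmpty && t.any f) = t.any f := by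
      intro t f; cases t <;> simp
    rw [hguard]
    simp only [List.mem_cons, exists_eq_or_imp]
    by_cases hA : ((triples w.toList).any (fun v =>
        hypernets.any (fun h =>
          PySem.Str.isIn (String.ofList [v.toList.getD 1 ' ', v.toList.getD 0 ' ', v.toList.getD 1 ' ']) h))) = true
    · simp only [hA, if_true, true_iff]
      exact Or.inl ((anyf_iff w hypernets).1 hA)
    · rw [if_neg hA]
      rw [ih]
      constructor
      · exact Or.inr
      · rintro (hw | hr)
        · exact absurd ((anyf_iff w hypernets).2 hw) hA
        · exact hr

theorem mem_foldl_add_filter {α : Type} (l : List α) (p : α → Bool) (f : α → String)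
    (s : PySem.Set String) (x : String) :
    x ∈ l.foldl (fun s t => if p t then PySem.Set.add s (f t) else s) s ↔
      x ∈ s ∨ ∃ t ∈ l, p t ∧ x = f t := by
  induction l generalizing s with
  | nil => simp
  | cons t l ih =>
    simp only [List.foldl_cons, ih, List.mem_cons]
    by_cases h : p t = true
    · simp [h, PySem.Set.mem_add]
      tauto
    · simp [h]

theorem mem_collect (l : List String) (p : Char × Char × Char → Bool)
    (f : Char × Char × Char → String) (s : PySem.Set String) (x : String) :
    x ∈ l.foldl (fun s str =>
        (win3 str.toList).foldl (fun s t => if p t then PySem.Set.add s (f t) else s) s) s ↔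
      x ∈ s ∨ ∃ str ∈ l, ∃ t ∈ win3 str.toList, p t ∧ x = f t := by
  induction l generalizing s with
  | nil => simp
  | cons str l ih =>
    simp only [List.foldl_cons, ih, mem_foldl_add_filter, List.mem_cons, exists_eq_or_imp]
    exact or_assoc

theorem B_true_iff (nets hypernets : List String) :
    valid_ip_aba_alt nets hypernets = true ↔
      ∃ x : String,
        (∃ net ∈ nets, ∃ t ∈ win3 net.toList, (t.1 == t.2.2 && t.1 != t.2.1) = true ∧ x = String.ofList [t.2.1, t.1, t.2.1]) ∧
        (∃ h ∈ hypernets, ∃ t ∈ win3 h.toList, (t.1 == t.2.2 && t.1 != t.2.1) = true ∧ x = String.ofList [t.1, t.2.1, t.2.2]) := by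
  rw [valid_ip_aba_alt]
  simp only [Bool.not_eq_true', List.isEmpty_eq_false_iff_exists_mem, PySem.Set.mem_inter,
    mem_collect]
  constructor
  · rintro ⟨x, (h1 | h1), h2⟩
    · exact absurd h1 (by simp [PySem.Set.empty])
    · rcases h2 with h2 | h2
      · exact absurd h2 (by simp [PySem.Set.empty])
      · exact ⟨x, h1, h2⟩
  · rintro ⟨x, h1, h2⟩
    exact ⟨x, Or.inr h1, Or.inr h2⟩

theorem ofList_inj {l1 l2 : List Char} (h : String.ofList l1 = String.ofList l2) : l1 = l2 := by
  simpa using congrArg String.toList h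

-- ===== VERDICT (by name: the statement is the Claim_ definition above) =====
theorem valid_ip_aba_spec : Claim_equal_valid_ip_aba := by
  intro nets hypernets _
  unfold Spec_valid_ip_aba
  rw [Bool.eq_iff_iff, A_true_iff, B_true_iff]
  constructor
  · rintro ⟨net, hnet, a, b, hwin, hab, h, hh, hin⟩
    refine ⟨String.ofList [b, a, b], ⟨net, hnet, (a, b, a), hwin, by simp [hab], rfl⟩, ?_⟩
    have hinf : [b, a, b] <:+: h.toList := by
      have := (PySem.Str.isIn_iff_infix _ _).1 hin
      simpa using this
    exact ⟨h, hh, (b, a, b), (mem_win3_iff_infix _ _ _ _).2 hinf, by simp [Ne.symm hab], rfl⟩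
  · rintro ⟨x, hA, hB⟩
    obtain ⟨net, hnet, ⟨p, q, r⟩, hwin, hc, hx1⟩ := hA
    obtain ⟨h, hh, ⟨u, v, u'⟩, hwin2, hc2, hx⟩ := hB
    obtain ⟨rfl, hpq⟩ := (by simpa using hc : p = r ∧ p ≠ q)
    obtain ⟨rfl, huv⟩ := (by simpa using hc2 : u = u' ∧ u ≠ v)
    have h3 : [q, p, q] = [u, v, u] := ofList_inj (hx1.symm.trans hx)
    obtain ⟨rfl, rfl⟩ : q = u ∧ p = v := by
      simp only [List.cons.injEq, and_true] at h3
      tauto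
    refine ⟨net, hnet, p, q, hwin, hpq, h, hh, ?_⟩
    rw [PySem.Str.isIn_iff_infix]
    simpa using (mem_win3_iff_infix _ _ _ _).1 hwin2
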